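-- pv_equiv track=rewrite | github.com/pg56714/onlinejudgePractice | code/P07.py | longest_special_palindrome
-- ===== SOURCE A (Python) =====
-- def is_palindrome(s):
--     return s == s[::-1]
--
-- def count_unique_letters(s):
--     return len(set(s))
--
-- def longest_special_palindrome(s):
--     n = len(s)
--     max_length = 0
--
--     for length in range(n, 2, -1):
--         for start in range(n - length + 1):
--             substr = s[start : start + length]
--             if is_palindrome(substr) and count_unique_letters(substr) >= 3:
--                 max_length = length
--                 return max_length
--
--     return max_length
-- ===== SOURCE B (Python) =====
-- def longest_special_palindrome(s):
--     n = len(s)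
--     best = 0
--     for c in range(2 * n - 1):
--         lo = (c + 1) // 2
--         hi = c // 2 + 1
--         while lo > 0 and hi < n and s[lo - 1] == s[hi]:
--             lo -= 1
--             hi += 1
--         if len(set(s[lo:hi])) >= 3:
--             best = max(best, hi - lo)
--     return best
-- ===== Notes on version B (the rewrite author's own statement) =====
-- stated objective: faster
-- what changed: Replaced the descending brute-force scan over all O(n^2) substrings with O(n) reverse-and-compare palindrome tests by expand-around-center: for each of the 2n-1 centers, grow the maximal palindrome once and keep the longest one with >=3 distinct letters.
import Mathlib
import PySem

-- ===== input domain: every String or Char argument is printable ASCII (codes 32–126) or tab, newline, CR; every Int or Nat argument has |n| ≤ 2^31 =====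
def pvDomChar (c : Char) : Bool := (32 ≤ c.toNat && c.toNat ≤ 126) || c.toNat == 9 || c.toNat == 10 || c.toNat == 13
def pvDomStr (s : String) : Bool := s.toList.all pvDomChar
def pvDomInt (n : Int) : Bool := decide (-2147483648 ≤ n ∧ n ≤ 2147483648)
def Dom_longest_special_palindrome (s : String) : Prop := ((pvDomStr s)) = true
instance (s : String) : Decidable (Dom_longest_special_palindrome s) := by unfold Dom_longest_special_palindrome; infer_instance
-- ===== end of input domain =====

-- B replaces A's descending brute-force scan over all substrings (reverse-compare each) with
-- expand-around-center: one maximal palindrome per center, keep the longest with ≥3 distinct letters.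

-- ===== PORT A =====
def pvIsPal (t : List Char) : Bool := t == t.reverse          -- is_palindrome: s == s[::-1]
def pvUnique (t : List Char) : Int := PySem.List.len (PySem.Set.ofList t)   -- count_unique_letters

def pvAInner (cs : List Char) (L : Int) : List Int → Option Int
  | [] => none
  | start :: rest =>
      let substr := PySem.List.slice cs (some start) (some (start + L))
      if pvIsPal substr && decide ((3 : Int) ≤ pvUnique substr) then some L
      else pvAInner cs L rest

def pvAOuter (cs : List Char) (n : Int) : List Int → Int
  | [] => 0
  | L :: rest =>
      match pvAInner cs L (PySem.List.pyRange 0 (n - L + 1) 1) with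
      | some v => v
      | none => pvAOuter cs n rest

def longest_special_palindrome (s : String) : Int :=
  let cs := s.toList
  let n : Int := PySem.List.len cs
  pvAOuter cs n (PySem.List.pyRange n 2 (-1))

-- ===== PORT B =====
def pvExpand (cs : List Char) (n lo hi : Int) : Int × Int :=
  if h : 0 < lo ∧ hi < n ∧ PySem.List.pyGetD cs (lo - 1) ' ' = PySem.List.pyGetD cs hi ' '
  then pvExpand cs n (lo - 1) (hi + 1)
  else (lo, hi)
termination_by lo.toNat
decreasing_by omega

def pvBStep (cs : List Char) (n best c : Int) : Int :=
  let lo := PySem.Int.floordiv (c + 1) 2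
  let hi := PySem.Int.floordiv c 2 + 1
  let p := pvExpand cs n lo hi
  if (3 : Int) ≤ PySem.List.len (PySem.Set.ofList (PySem.List.slice cs (some p.1) (some p.2)))
  then max best (p.2 - p.1) else best

def longest_special_palindrome_alt (s : String) : Int :=
  let cs := s.toList
  let n : Int := PySem.List.len cs
  (PySem.List.pyRange 0 (2 * n - 1) 1).foldl (pvBStep cs n) 0

-- ===== PRECONDITION & SPEC =====
def Spec_longest_special_palindrome (s : String) (out : Int) : Prop := out = longest_special_palindrome_alt s
instance (s : String) (out : Int) : Decidable (Spec_longest_special_palindrome s out) := by unfold Spec_longest_special_palindrome; infer_instance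

-- ===== CLAIM (what is proved, stated in full; the proofs are below) =====
def Claim_equal_longest_special_palindrome : Prop := ∀ (s : String), Dom_longest_special_palindrome s → Spec_longest_special_palindrome s (longest_special_palindrome s)

-- ===== LEMMAS AND PROOFS =====

-- the substring cs[a:b] (Nat bounds)
def pvSub (cs : List Char) (a b : Nat) : List Char := (cs.drop a).take (b - a)

-- "L is a good length": some substring of that length is a palindrome with ≥3 distinct letters
def pvGood (cs : List Char) (L : Nat) : Prop :=
  ∃ a : Nat, a + L ≤ cs.length ∧ pvSub cs a (a + L) = (pvSub cs a (a + L)).reverse ∧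
    3 ≤ (PySem.Set.ofList (pvSub cs a (a + L))).length

-- "r is the answer": r bounds every good length and is 0 or itself good
def pvOpt (cs : List Char) (r : Int) : Prop :=
  (∀ L : Nat, pvGood cs L → (L : Int) ≤ r) ∧ (r = 0 ∨ ∃ L : Nat, pvGood cs L ∧ r = (L : Int))

lemma pvGood_three {cs : List Char} {L : Nat} (h : pvGood cs L) : 3 ≤ L := by
  obtain ⟨a, hle, _, hd⟩ := h
  have h1 : (PySem.Set.ofList (pvSub cs a (a + L))).length ≤ (pvSub cs a (a + L)).length :=
    PySem.Set.length_ofList_le _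
  have h2 : (pvSub cs a (a + L)).length ≤ L := by
    have := List.length_take_le (a + L - a) (cs.drop a)
    unfold pvSub
    omega
  omega

lemma pvOpt_unique {cs : List Char} {r r' : Int} (h : pvOpt cs r) (h' : pvOpt cs r') : r = r' := by
  obtain ⟨hb, h0⟩ := h
  obtain ⟨hb', h0'⟩ := h'
  rcases h0 with rfl | ⟨L, hL, rfl⟩ <;> rcases h0' with rfl | ⟨L', hL', rfl⟩
  · rfl
  · have := hb L' hL'; have := pvGood_three hL'; omega
  · have := hb' L hL; have := pvGood_three hL; omega
  · have := hb L' hL'; have := hb' L hL; omega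

-- ---------- A side ----------

-- the Bool condition A tests on the substring starting at st with length L
def pvCB (cs : List Char) (st L : Int) : Bool :=
  let substr := PySem.List.slice cs (some st) (some (st + L))
  pvIsPal substr && decide ((3 : Int) ≤ pvUnique substr)

lemma slice_eq_pvSub (cs : List Char) (st L : Int) (h1 : 0 ≤ st) (h2 : 0 ≤ L) :
    PySem.List.slice cs (some st) (some (st + L)) = pvSub cs st.toNat (st.toNat + L.toNat) := by
  have hb : (0 : Int) ≤ st + L := by omega
  rw [PySem.List.slice_toNat cs h1 hb]
  unfold pvSub
  congr 1
  omega

lemma pvCB_iff (cs : List Char) (st L : Int) (h1 : 0 ≤ st) (h2 : 0 ≤ L) :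
    pvCB cs st L = true ↔
      (pvSub cs st.toNat (st.toNat + L.toNat) = (pvSub cs st.toNat (st.toNat + L.toNat)).reverse ∧
       3 ≤ (PySem.Set.ofList (pvSub cs st.toNat (st.toNat + L.toNat))).length) := by
  simp only [pvCB, pvIsPal, pvUnique]
  rw [slice_eq_pvSub cs st L h1 h2]
  simp only [Bool.and_eq_true, beq_iff_eq, decide_eq_true_eq, PySem.List.len_eq]
  constructor <;> rintro ⟨hp, hd⟩ <;> exact ⟨hp, by exact_mod_cast hd⟩

lemma pvAInner_eq (cs : List Char) (L : Int) (starts : List Int) :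
    pvAInner cs L starts = if starts.any (fun st => pvCB cs st L) then some L else none := by
  induction starts with
  | nil => simp [pvAInner]
  | cons st rest ih =>
    have hstep : pvAInner cs L (st :: rest) =
        if pvCB cs st L then some L else pvAInner cs L rest := by
      simp [pvAInner, pvCB]
    by_cases h : pvCB cs st L = true <;> simp [hstep, h, ih]

lemma pvGood_iff_any (cs : List Char) (L : Int) (hL : 2 < L) :
    ((PySem.List.pyRange 0 ((cs.length : Int) - L + 1) 1).any (fun st => pvCB cs st L) = true) ↔
      pvGood cs L.toNat := by
  rw [List.any_eq_true]
  constructor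
  · rintro ⟨st, hmem, hcb⟩
    rw [PySem.List.mem_pyRange_one] at hmem
    have h := (pvCB_iff cs st L hmem.1 (by omega)).mp hcb
    exact ⟨st.toNat, by omega, h.1, h.2⟩
  · rintro ⟨a, hle, hpal, hdist⟩
    refine ⟨(a : Int), ?_, ?_⟩
    · rw [PySem.List.mem_pyRange_one]
      omega
    · apply (pvCB_iff cs (a : Int) L (by omega) (by omega)).mpr
      have e : ((a : Int)).toNat = a := by omega
      rw [e]
      exact ⟨hpal, hdist⟩

lemma pvAOuter_spec (cs : List Char) (k : Nat) : ∀ m : Int, m ≤ 2 + k →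
    (pvAOuter cs (cs.length : Int) (PySem.List.pyRange m 2 (-1)) = 0 ∧
      ∀ L : Nat, pvGood cs L → ¬((L : Int) ≤ m)) ∨
    (∃ L : Nat, pvGood cs L ∧ (L : Int) ≤ m ∧
      pvAOuter cs (cs.length : Int) (PySem.List.pyRange m 2 (-1)) = (L : Int) ∧
      ∀ L' : Nat, pvGood cs L' → (L' : Int) ≤ m → L' ≤ L) := by
  induction k with
  | zero =>
    intro m hm
    left
    rw [PySem.List.pyRange_neg_one_eq_nil (by omega)]
    refine ⟨rfl, ?_⟩
    intro L hL hle
    have := pvGood_three hL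
    omega
  | succ k ih =>
    intro m hm
    by_cases hsmall : m ≤ 2
    · left
      rw [PySem.List.pyRange_neg_one_eq_nil (by omega)]
      refine ⟨rfl, ?_⟩
      intro L hL hle
      have := pvGood_three hL
      omega
    · rw [PySem.List.pyRange_neg_one_cons (by omega)]
      by_cases hex : (PySem.List.pyRange 0 ((cs.length : Int) - m + 1) 1).any (fun st => pvCB cs st m) = true
      · have hg : pvGood cs m.toNat := (pvGood_iff_any cs m (by omega)).mp hex
        have hinner : pvAInner cs m (PySem.List.pyRange 0 ((cs.length : Int) - m + 1) 1) = some m := by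
          rw [pvAInner_eq, if_pos hex]
        right
        refine ⟨m.toNat, hg, by omega, ?_, ?_⟩
        · simp [pvAOuter, hinner]; omega
        · intro L' _ h2; omega
      · have hnone : pvAInner cs m (PySem.List.pyRange 0 ((cs.length : Int) - m + 1) 1) = none := by
          rw [pvAInner_eq, if_neg hex]
        have hng : ¬ pvGood cs m.toNat := fun h => hex ((pvGood_iff_any cs m (by omega)).mpr h)
        have hred : pvAOuter cs (cs.length : Int) (m :: PySem.List.pyRange (m - 1) 2 (-1)) =
            pvAOuter cs (cs.length : Int) (PySem.List.pyRange (m - 1) 2 (-1)) := by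
          simp [pvAOuter, hnone]
        rw [hred]
        rcases ih (m - 1) (by omega) with ⟨h0, hno⟩ | ⟨L, hL, hle, heq, hmax⟩
        · left
          refine ⟨h0, ?_⟩
          intro L hLg hle
          by_cases hLm : (L : Int) = m
          · have e : L = m.toNat := by omega
            exact hng (e ▸ hLg)
          · exact hno L hLg (by omega)
        · right
          refine ⟨L, hL, by omega, heq, ?_⟩
          intro L' h1 h2
          by_cases hLm : (L' : Int) = m
          · have e : L' = m.toNat := by omega
            exact absurd (e ▸ h1) hng
          · exact hmax L' h1 (by omega)

theorem pvA_opt (cs : List Char) :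
    pvOpt cs (pvAOuter cs (cs.length : Int) (PySem.List.pyRange (cs.length : Int) 2 (-1))) := by
  have hLn : ∀ L : Nat, pvGood cs L → (L : Int) ≤ (cs.length : Int) := by
    rintro L ⟨a, h1, -, -⟩
    omega
  rcases pvAOuter_spec cs cs.length (cs.length : Int) (by omega) with ⟨h0, hno⟩ | ⟨L, hL, _, heq, hmax⟩
  · constructor
    · intro L hLg
      exact absurd (hLn L hLg) (hno L hLg)
    · left; exact h0
  · constructor
    · intro L' hLg
      have := hmax L' hLg (hLn L' hLg)
      rw [heq]
      omega
    · right; exact ⟨L, hL, heq⟩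

-- ---------- B side: palindrome geometry ----------

lemma pvSub_decomp (cs : List Char) (a b : Nat) (ha : 1 ≤ a) (hab : a ≤ b) (hb : b < cs.length) :
    pvSub cs (a - 1) (b + 1) = cs.getD (a - 1) ' ' :: (pvSub cs a b ++ [cs.getD b ' ']) := by
  have h1 : a - 1 < cs.length := by omega
  have ea : a - 1 + 1 = a := by omega
  have hdrop : cs.drop (a - 1) = cs[a - 1] :: cs.drop a := by
    rw [List.drop_eq_getElem_cons h1, ea]
  unfold pvSub
  rw [hdrop]
  have e1 : b + 1 - (a - 1) = (b - a + 1) + 1 := by omega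
  rw [e1, List.take_succ_cons]
  have e2 : (cs.drop a).take (b - a + 1) = (cs.drop a).take (b - a) ++ ((cs.drop a)[b - a]?).toList := by
    rw [List.take_add_one]
  have e3 : (cs.drop a)[b - a]? = some cs[b] := by
    rw [List.getElem?_drop]
    have e : a + (b - a) = b := by omega
    rw [e]
    exact List.getElem?_eq_getElem hb
  rw [e2, e3]
  have e4 : cs.getD (a - 1) ' ' = cs[a - 1] := List.getD_eq_getElem cs ' ' h1
  have e5 : cs.getD b ' ' = cs[b] := List.getD_eq_getElem cs ' ' hb
  rw [e4, e5]
  simp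

lemma pal_extend {x y : Char} {t : List Char} (hxy : x = y) (ht : t = t.reverse) :
    (x :: (t ++ [y])) = (x :: (t ++ [y])).reverse := by
  subst hxy
  simp [List.reverse_append]
  conv_lhs => rw [ht]

lemma pal_shrink {x y : Char} {t : List Char}
    (h : (x :: (t ++ [y])) = (x :: (t ++ [y])).reverse) : x = y ∧ t = t.reverse := by
  simp [List.reverse_append] at h
  exact ⟨h.1, h.2.1⟩

lemma pal_extend_nat (cs : List Char) (a b : Nat) (ha : 1 ≤ a) (hab : a ≤ b) (hb : b < cs.length)
    (heq : cs.getD (a - 1) ' ' = cs.getD b ' ')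
    (hp : pvSub cs a b = (pvSub cs a b).reverse) :
    pvSub cs (a - 1) (b + 1) = (pvSub cs (a - 1) (b + 1)).reverse := by
  rw [pvSub_decomp cs a b ha hab hb]
  exact pal_extend heq hp

lemma pal_shrink_nat (cs : List Char) (a b : Nat) (ha : 1 ≤ a) (hab : a ≤ b) (hb : b < cs.length)
    (hp : pvSub cs (a - 1) (b + 1) = (pvSub cs (a - 1) (b + 1)).reverse) :
    cs.getD (a - 1) ' ' = cs.getD b ' ' ∧ pvSub cs a b = (pvSub cs a b).reverse := by
  rw [pvSub_decomp cs a b ha hab hb] at hp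
  exact pal_shrink hp

-- no palindrome with the same center sticks out of the maximal (stopped) expansion
lemma pal_center (cs : List Char) (p1 p2 : Nat) (hpp : p1 ≤ p2)
    (hstop : ¬(1 ≤ p1 ∧ p2 < cs.length ∧ cs.getD (p1 - 1) ' ' = cs.getD p2 ' ')) :
    ∀ d : Nat, ∀ a b : Nat, a + d = p1 → b = p2 + d → b ≤ cs.length →
      pvSub cs a b = (pvSub cs a b).reverse → d = 0 := by
  intro d
  induction d with
  | zero => intro a b _ _ _ _; rfl
  | succ k ihk =>
    intro a b h1 h2 h3 hp
    exfalso
    have hp' : pvSub cs ((a + 1) - 1) ((b - 1) + 1) = (pvSub cs ((a + 1) - 1) ((b - 1) + 1)).reverse := by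
      have e1 : a + 1 - 1 = a := by omega
      have e2 : b - 1 + 1 = b := by omega
      rw [e1, e2]; exact hp
    have hd := pal_shrink_nat cs (a + 1) (b - 1) (by omega) (by omega) (by omega) hp'
    match k, ihk with
    | 0, _ =>
      apply hstop
      have e1 : a + 1 - 1 = p1 - 1 := by omega
      have e2 : b - 1 = p2 := by omega
      refine ⟨by omega, by omega, ?_⟩
      rw [← e1, ← e2]
      exact hd.1
    | (k' + 1), ihk =>
      have := ihk (a + 1) (b - 1) (by omega) (by omega) (by omega) hd.2
      omega

-- a sub-range's characters all occur in the enclosing range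
lemma pvSub_subset (cs : List Char) (a b a' b' : Nat) (h1 : a' ≤ a) (h2 : b ≤ b') :
    ∀ x ∈ pvSub cs a b, x ∈ pvSub cs a' b' := by
  intro x hx
  have he : pvSub cs a b = ((pvSub cs a' b').drop (a - a')).take (b - a) := by
    unfold pvSub
    rw [List.drop_take, List.drop_drop, List.take_take]
    have e1 : a' + (a - a') = a := by omega
    have e2 : min (b - a) (b' - a' - (a - a')) = b - a := by omega
    rw [e1, e2]
  rw [he] at hx
  exact List.drop_subset _ _ (List.take_subset _ _ hx)

lemma setlen_mono {s t : List Char} (h : ∀ x ∈ s, x ∈ t) :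
    (PySem.Set.ofList s).length ≤ (PySem.Set.ofList t).length := by
  have hs := List.toFinset_card_of_nodup (PySem.Set.nodup_ofList (xs := s))
  have ht := List.toFinset_card_of_nodup (PySem.Set.nodup_ofList (xs := t))
  have hsub : (PySem.Set.ofList s).toFinset ⊆ (PySem.Set.ofList t).toFinset := by
    intro x hx
    rw [List.mem_toFinset, PySem.Set.mem_ofList] at hx
    rw [List.mem_toFinset, PySem.Set.mem_ofList]
    exact h x hx
  have := Finset.card_le_card hsub
  omega

lemma short_pal (l : List Char) (h : l.length ≤ 1) : l = l.reverse := by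
  match l with
  | [] => rfl
  | [x] => rfl
  | x :: y :: t => simp at h

-- ---------- B side: the expansion loop ----------

lemma pvExpand_spec (cs : List Char) :
    ∀ (fuel : Nat) (lo hi : Int), lo.toNat ≤ fuel → 0 ≤ lo → lo ≤ hi → hi ≤ (cs.length : Int) →
      pvSub cs lo.toNat hi.toNat = (pvSub cs lo.toNat hi.toNat).reverse →
      ∃ lo' hi', pvExpand cs (cs.length : Int) lo hi = (lo', hi') ∧
        0 ≤ lo' ∧ lo' ≤ lo ∧ hi ≤ hi' ∧ hi' ≤ (cs.length : Int) ∧ lo' + hi' = lo + hi ∧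
        pvSub cs lo'.toNat hi'.toNat = (pvSub cs lo'.toNat hi'.toNat).reverse ∧
        ¬(0 < lo' ∧ hi' < (cs.length : Int) ∧
          PySem.List.pyGetD cs (lo' - 1) ' ' = PySem.List.pyGetD cs hi' ' ') := by
  intro fuel
  induction fuel with
  | zero =>
    intro lo hi hfuel h0 hlh hn hpal
    have hng : ¬(0 < lo ∧ hi < (cs.length : Int) ∧
        PySem.List.pyGetD cs (lo - 1) ' ' = PySem.List.pyGetD cs hi ' ') := by
      rintro ⟨h, -, -⟩
      omega
    rw [pvExpand, dif_neg hng]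
    exact ⟨lo, hi, rfl, h0, le_refl _, le_refl _, hn, rfl, hpal, hng⟩
  | succ f ih =>
    intro lo hi hfuel h0 hlh hn hpal
    rw [pvExpand]
    by_cases hg : 0 < lo ∧ hi < (cs.length : Int) ∧
        PySem.List.pyGetD cs (lo - 1) ' ' = PySem.List.pyGetD cs hi ' '
    · rw [dif_pos hg]
      obtain ⟨hg1, hg2, hg3⟩ := hg
      have e1 : lo - 1 = ((lo.toNat - 1 : Nat) : Int) := by omega
      have e2 : hi = ((hi.toNat : Nat) : Int) := by omega
      rw [e1, e2] at hg3
      rw [PySem.List.pyGetD_natCast, PySem.List.pyGetD_natCast] at hg3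
      have hpal' : pvSub cs (lo - 1).toNat (hi + 1).toNat = (pvSub cs (lo - 1).toNat (hi + 1).toNat).reverse := by
        have e3 : (lo - 1).toNat = lo.toNat - 1 := by omega
        have e4 : (hi + 1).toNat = hi.toNat + 1 := by omega
        rw [e3, e4]
        exact pal_extend_nat cs lo.toNat hi.toNat (by omega) (by omega) (by omega) hg3 hpal
      obtain ⟨lo', hi', heq, hr⟩ := ih (lo - 1) (hi + 1) (by omega) (by omega) (by omega) (by omega) hpal'
      exact ⟨lo', hi', heq, hr.1, by omega, by omega, hr.2.2.2.1, by omega, hr.2.2.2.2.2⟩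
    · rw [dif_neg hg]
      exact ⟨lo, hi, rfl, h0, le_refl _, le_refl _, hn, rfl, hpal, hg⟩

-- the maximal expansion from the seed of center c, and the two facts B's step tests
def pvP (cs : List Char) (n c : Int) : Int × Int :=
  pvExpand cs n (PySem.Int.floordiv (c + 1) 2) (PySem.Int.floordiv c 2 + 1)

def pvVal (cs : List Char) (n c : Int) : Int := (pvP cs n c).2 - (pvP cs n c).1

def pvHit (cs : List Char) (n c : Int) : Prop :=
  3 ≤ PySem.List.len (PySem.Set.ofList
    (PySem.List.slice cs (some (pvP cs n c).1) (some (pvP cs n c).2)))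

lemma pvBStep_pos {cs : List Char} {n c : Int} (b : Int) (h : pvHit cs n c) :
    pvBStep cs n b c = max b (pvVal cs n c) := by
  unfold pvHit pvP at h
  simp only [pvBStep]
  rw [if_pos h]
  rfl

lemma pvBStep_neg {cs : List Char} {n c : Int} (b : Int) (h : ¬ pvHit cs n c) :
    pvBStep cs n b c = b := by
  unfold pvHit pvP at h
  simp only [pvBStep]
  rw [if_neg h]

lemma foldl_bstep (cs : List Char) (n : Int) :
    ∀ (t : List Int) (init : Int),
      init ≤ t.foldl (pvBStep cs n) init ∧
      (t.foldl (pvBStep cs n) init = init ∨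
        ∃ c ∈ t, pvHit cs n c ∧ t.foldl (pvBStep cs n) init = pvVal cs n c) ∧
      (∀ c ∈ t, pvHit cs n c → pvVal cs n c ≤ t.foldl (pvBStep cs n) init) := by
  intro t
  induction t with
  | nil => intro init; simp
  | cons c rest ih =>
    intro init
    simp only [List.foldl_cons]
    obtain ⟨ih1, ih2, ih3⟩ := ih (pvBStep cs n init c)
    by_cases h : pvHit cs n c
    · rw [pvBStep_pos init h] at ih1 ih2 ih3 ⊢
      refine ⟨by omega, ?_, ?_⟩
      · rcases ih2 with heq | ⟨c', hc', hh', heq'⟩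
        · rcases le_total (pvVal cs n c) init with hle | hlt
          · left; rw [heq]; omega
          · right; exact ⟨c, List.mem_cons_self, h, by rw [heq]; omega⟩
        · right; exact ⟨c', List.mem_cons_of_mem _ hc', hh', heq'⟩
      · intro c' hc' hh'
        rcases List.mem_cons.mp hc' with rfl | hmem
        · have : max init (pvVal cs n c') ≤ _ := ih1
          omega
        · exact ih3 c' hmem hh'
    · rw [pvBStep_neg init h] at ih1 ih2 ih3 ⊢
      refine ⟨ih1, ?_, ?_⟩
      · rcases ih2 with heq | ⟨c', hc', hh', heq'⟩
        · left; exact heq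
        · right; exact ⟨c', List.mem_cons_of_mem _ hc', hh', heq'⟩
      · intro c' hc' hh'
        rcases List.mem_cons.mp hc' with rfl | hmem
        · exact absurd hh' h
        · exact ih3 c' hmem hh'

-- seed properties and the full analysis of one center
lemma pvP_spec (cs : List Char) (c : Int) (hc0 : 0 ≤ c) (hc1 : c < 2 * (cs.length : Int) - 1) :
    ∃ lo' hi', pvP cs (cs.length : Int) c = (lo', hi') ∧
      0 ≤ lo' ∧ lo' ≤ hi' ∧ hi' ≤ (cs.length : Int) ∧ lo' + hi' = c + 1 ∧
      pvSub cs lo'.toNat hi'.toNat = (pvSub cs lo'.toNat hi'.toNat).reverse ∧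
      ¬(0 < lo' ∧ hi' < (cs.length : Int) ∧
        PySem.List.pyGetD cs (lo' - 1) ' ' = PySem.List.pyGetD cs hi' ' ') := by
  have hl : PySem.Int.floordiv (c + 1) 2 = (c + 1) / 2 := PySem.Int.floordiv_eq_ediv_of_pos (by omega)
  have hh : PySem.Int.floordiv c 2 = c / 2 := PySem.Int.floordiv_eq_ediv_of_pos (by omega)
  have h1 : 0 ≤ PySem.Int.floordiv (c + 1) 2 := by rw [hl]; omega
  have h2 : PySem.Int.floordiv (c + 1) 2 ≤ PySem.Int.floordiv c 2 + 1 := by rw [hl, hh]; omega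
  have h3 : PySem.Int.floordiv c 2 + 1 ≤ (cs.length : Int) := by rw [hh]; omega
  have h4 : PySem.Int.floordiv (c + 1) 2 + (PySem.Int.floordiv c 2 + 1) = c + 1 := by
    rw [hl, hh]; omega
  have h5 : PySem.Int.floordiv c 2 + 1 - PySem.Int.floordiv (c + 1) 2 ≤ 1 := by
    rw [hl, hh]; omega
  have hseed : pvSub cs (PySem.Int.floordiv (c + 1) 2).toNat (PySem.Int.floordiv c 2 + 1).toNat =
      (pvSub cs (PySem.Int.floordiv (c + 1) 2).toNat (PySem.Int.floordiv c 2 + 1).toNat).reverse := by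
    apply short_pal
    have := List.length_take_le ((PySem.Int.floordiv c 2 + 1).toNat - (PySem.Int.floordiv (c + 1) 2).toNat)
      (cs.drop (PySem.Int.floordiv (c + 1) 2).toNat)
    unfold pvSub
    omega
  obtain ⟨lo', hi', heq, hr⟩ := pvExpand_spec cs (PySem.Int.floordiv (c + 1) 2).toNat
    (PySem.Int.floordiv (c + 1) 2) (PySem.Int.floordiv c 2 + 1) (le_refl _) h1 h2 h3 hseed
  exact ⟨lo', hi', heq, hr.1, by omega, hr.2.2.2.1, by omega, hr.2.2.2.2.2⟩

-- slice with the expansion's nonnegative endpoints is pvSub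
lemma slice_pvP (cs : List Char) (lo' hi' : Int) (h0 : 0 ≤ lo') (h1 : lo' ≤ hi') :
    PySem.List.slice cs (some lo') (some hi') = pvSub cs lo'.toNat hi'.toNat := by
  rw [PySem.List.slice_toNat cs h0 (by omega : (0 : Int) ≤ hi')]
  rfl

theorem pvB_opt (cs : List Char) :
    pvOpt cs ((PySem.List.pyRange 0 (2 * (cs.length : Int) - 1) 1).foldl
      (pvBStep cs (cs.length : Int)) 0) := by
  obtain ⟨hlb, hmem, hub⟩ := foldl_bstep cs (cs.length : Int) (PySem.List.pyRange 0 (2 * (cs.length : Int) - 1) 1) 0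
  constructor
  · -- every good length is bounded by the result
    intro L hg
    obtain ⟨a, hle, hpal, hdist⟩ := hg
    have h3 : 3 ≤ L := pvGood_three ⟨a, hle, hpal, hdist⟩
    set c : Int := 2 * (a : Int) + (L : Int) - 1 with hc
    have hcmem : c ∈ PySem.List.pyRange 0 (2 * (cs.length : Int) - 1) 1 := by
      rw [PySem.List.mem_pyRange_one]
      omega
    obtain ⟨lo', hi', heq, hr0, hr1, hr2, hr3, hr4, hr5⟩ :=
      pvP_spec cs c (by omega) (by omega)
    have hkey : lo' ≤ (a : Int) := by
      by_contra hlt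
      have hstopN : ¬(1 ≤ lo'.toNat ∧ hi'.toNat < cs.length ∧
          cs.getD (lo'.toNat - 1) ' ' = cs.getD hi'.toNat ' ') := by
        rintro ⟨k1, k2, k3⟩
        apply hr5
        refine ⟨by omega, by omega, ?_⟩
        have e1 : lo' - 1 = ((lo'.toNat - 1 : Nat) : Int) := by omega
        have e2 : hi' = ((hi'.toNat : Nat) : Int) := by omega
        rw [e1, e2, PySem.List.pyGetD_natCast, PySem.List.pyGetD_natCast]
        exact k3
      have hd := pal_center cs lo'.toNat hi'.toNat (by omega) hstopN
        (lo'.toNat - a) a (a + L) (by omega) (by omega) (by omega) hpal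
      omega
    have hhit : pvHit cs (cs.length : Int) c := by
      unfold pvHit
      rw [heq]
      rw [slice_pvP cs lo' hi' hr0 hr1, PySem.List.len_eq]
      have hmono := setlen_mono (pvSub_subset cs a (a + L) lo'.toNat hi'.toNat (by omega) (by omega))
      omega
    have hval : (L : Int) ≤ pvVal cs (cs.length : Int) c := by
      unfold pvVal
      rw [heq]
      omega
    have := hub c hcmem hhit
    omega
  · -- the result is 0 or itself a good length
    rcases hmem with h0 | ⟨c, hcmem, hhit, heqr⟩
    · left; exact h0
    · right
      rw [PySem.List.mem_pyRange_one] at hcmem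
      obtain ⟨lo', hi', heq, hr0, hr1, hr2, hr3, hr4, hr5⟩ :=
        pvP_spec cs c hcmem.1 hcmem.2
      refine ⟨(hi' - lo').toNat, ⟨lo'.toNat, ?_, ?_, ?_⟩, ?_⟩
      · omega
      · have e : lo'.toNat + (hi' - lo').toNat = hi'.toNat := by omega
        rw [e]; exact hr4
      · have e : lo'.toNat + (hi' - lo').toNat = hi'.toNat := by omega
        rw [e]
        unfold pvHit at hhit
        rw [heq] at hhit
        rw [slice_pvP cs lo' hi' hr0 hr1, PySem.List.len_eq] at hhit
        omega
      · rw [heqr]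
        unfold pvVal
        rw [heq]
        omega

-- ===== VERDICT (by name: the statement is the Claim_ definition above) =====
theorem longest_special_palindrome_spec : Claim_equal_longest_special_palindrome := by
  intro s _
  unfold Spec_longest_special_palindrome longest_special_palindrome longest_special_palindrome_alt
  simp only [PySem.List.len_eq]
  exact pvOpt_unique (pvA_opt s.toList) (pvB_opt s.toList)
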